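-- pv_equiv track=rewrite | github.com/pablocnds/dynamic_visualizer | src/visualizer/cards/models.py | _template_to_glob
-- ===== SOURCE A (Python) =====
-- from typing import Dict, List, Optional, Tuple
--
-- def _template_to_glob(template: str) -> str:
--     pattern: List[str] = []
--     i = 0
--     length = len(template)
--     while i < length:
--         if template.startswith("{{", i):
--             end = template.find("}}", i)
--             if end == -1:
--                 raise ValueError("Unclosed variable in template")
--             pattern.append("*")
--             i = end + 2
--         else:
--             pattern.append(template[i])
--             i += 1
--     return "".join(pattern)
-- ===== SOURCE B (Python) =====
-- def _template_to_glob(template: str) -> str: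
--     # Split once on the closing marker; each non-final segment ends where a "}}" was.
--     out = []
--     segments = template.split("}}")
--     last = len(segments) - 1
--     for k, seg in enumerate(segments):
--         j = seg.find("{{")
--         if j == -1:
--             out.append(seg)
--             if k != last:
--                 out.append("}}")
--         else:
--             if k == last:
--                 raise ValueError("Unclosed variable in template")
--             out.append(seg[:j])
--             out.append("*")
--     return "".join(out)
-- ===== Notes on version B (the rewrite author's own statement) =====
-- stated objective: faster
-- what changed: Replaces A's per-character index-walking while-loop (startswith/find at each position) by one str.split on the closing marker followed by a single pass over the resulting segments, emitting each segment's literal prefix and a star where it opens a variable.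
import Mathlib
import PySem

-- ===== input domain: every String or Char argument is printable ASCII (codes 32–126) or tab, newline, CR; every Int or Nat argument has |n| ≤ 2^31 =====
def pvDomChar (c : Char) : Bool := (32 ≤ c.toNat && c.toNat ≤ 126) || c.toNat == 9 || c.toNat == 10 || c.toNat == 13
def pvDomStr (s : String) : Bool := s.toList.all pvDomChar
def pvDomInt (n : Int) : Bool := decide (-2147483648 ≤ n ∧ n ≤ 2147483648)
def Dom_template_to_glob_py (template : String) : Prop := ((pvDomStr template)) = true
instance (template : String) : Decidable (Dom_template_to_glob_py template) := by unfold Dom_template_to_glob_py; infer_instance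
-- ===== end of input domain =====

-- B replaces A's index-walking scan by one split on "}}" plus a per-segment pass (simpler control flow, C-level split in Python); return-value equivalence only (A raises ValueError on unclosed variables, excluded by Pre_).

-- ===== PORT A =====
-- template.find("}}", i): offset of the first "}}" in the suffix from i (Python -1 ↦ none); exact for any char list
def findBB : List Char → Option Nat
  | [] => none
  | [_] => none
  | a :: b :: t => if a = '}' ∧ b = '}' then some 0 else (findBB (b :: t)).map (· + 1)

theorem findBB_lt : ∀ (l : List Char) (e : Nat), findBB l = some e → e + 1 < l.length
  | [], e, h => by simp [findBB] at h
  | [_], e, h => by simp [findBB] at h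
  | a :: b :: t, e, h => by
    simp only [findBB] at h
    split at h
    · simp only [Option.some.injEq] at h
      subst h
      simp
    · simp only [Option.map_eq_some_iff] at h
      obtain ⟨e', he', rfl⟩ := h
      have := findBB_lt (b :: t) e' he'
      simp only [List.length_cons] at *
      omega

-- the while loop of A, state (pattern, i) represented by the remaining suffix template[i:]
-- (i only ever increases; template[i] = head of suffix, startswith("{{", i) = suffix starts with "{{",
--  find("}}", i) = findBB of the suffix); none = the 'raise ValueError' path
def loopA : List Char → Option (List Char)
  | [] => some []
  | c :: t =>
    if c = '{' ∧ t.head? = some '{' then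
      match h : findBB (c :: t) with
      | none => none              -- raise ValueError("Unclosed variable in template")
      | some e => (loopA ((c :: t).drop (e + 2))).map ('*' :: ·)
    else
      (loopA t).map (c :: ·)
  termination_by l => l.length
  decreasing_by
  all_goals first
  | (have := findBB_lt _ _ h; simp [List.length_drop])
  | simp

def template_to_glob_py (template : String) : String :=
  match loopA template.toList with
  | some l => String.ofList l
  | none => ""                    -- Python raises ValueError here; excluded by Pre_

-- ===== PORT B =====
-- template.split("}}"): leftmost non-overlapping split, exact (Python gives [""] on "")
def splitBB (l : List Char) : List (List Char) :=
  match h : findBB l with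
  | none => [l]
  | some e => l.take e :: splitBB (l.drop (e + 2))
  termination_by l.length
  decreasing_by
    have := findBB_lt _ _ h
    simp [List.length_drop]; omega

-- seg.find("{{") (Python -1 ↦ none); exact for any char list
def findCB : List Char → Option Nat
  | [] => none
  | [_] => none
  | a :: b :: t => if a = '{' ∧ b = '{' then some 0 else (findCB (b :: t)).map (· + 1)

-- the for-loop of Source B over the segments; the singleton case is k == last; none = the raise path
def procSegs : List (List Char) → Option (List Char)
  | [] => some []                          -- unreachable: split never returns []
  | [seg] =>
    match findCB seg with
    | none => some seg
    | some _ => none                       -- raise ValueError("Unclosed variable in template")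
  | seg :: seg' :: rest =>
    match findCB seg with
    | none => (procSegs (seg' :: rest)).map (fun o => seg ++ '}' :: '}' :: o)
    | some j => (procSegs (seg' :: rest)).map (fun o => seg.take j ++ '*' :: o)

def template_to_glob_py_alt (template : String) : String :=
  match procSegs (splitBB template.toList) with
  | some l => String.ofList l
  | none => ""                    -- Python raises ValueError here; excluded by Pre_

-- ===== PRECONDITION & SPEC =====
-- Pre_ excludes exactly the inputs on which A raises ValueError: some "{{" with no "}}" at or after it.
def Pre_template_to_glob_py (template : String) : Prop :=
  ∀ i < template.toList.length, (template.toList[i]? = some '{' ∧ template.toList[i+1]? = some '{') →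
    ∃ j < template.toList.length, i ≤ j ∧ template.toList[j]? = some '}' ∧ template.toList[j+1]? = some '}'
instance (template : String) : Decidable (Pre_template_to_glob_py template) := by unfold Pre_template_to_glob_py; infer_instance

def pvWitness_template_to_glob_py : String := "a{{x}}-{{y}}b"

def Spec_template_to_glob_py (template : String) (out : String) : Prop := out = template_to_glob_py_alt template
instance (template : String) (out : String) : Decidable (Spec_template_to_glob_py template out) := by unfold Spec_template_to_glob_py; infer_instance

-- ===== CLAIM (what is proved, stated in full; the proofs are below) =====
def Claim_equal_template_to_glob_py : Prop := ∀ (template : String), Dom_template_to_glob_py template → Pre_template_to_glob_py template → Spec_template_to_glob_py template (template_to_glob_py template)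

-- ===== LEMMAS AND PROOFS =====

theorem findBB_cons_none {a : Char} {t : List Char} (h : findBB (a :: t) = none) :
    findBB t = none := by
  cases t with
  | nil => rfl
  | cons b t' =>
    simp only [findBB] at h
    split at h
    · exact absurd h (by simp)
    · simpa using h

theorem findCB_cons (a : Char) (t : List Char) (h : ¬(a = '{' ∧ t.head? = some '{')) :
    findCB (a :: t) = (findCB t).map (· + 1) := by
  cases t with
  | nil => rfl
  | cons b t' =>
    simp only [findCB]
    rw [if_neg]
    simpa using h

theorem findCB_lt : ∀ (l : List Char) (j : Nat), findCB l = some j → j + 1 < l.length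
  | [], j, h => by simp [findCB] at h
  | [_], j, h => by simp [findCB] at h
  | a :: b :: t, j, h => by
    simp only [findCB] at h
    split at h
    · simp only [Option.some.injEq] at h
      subst h
      simp
    · simp only [Option.map_eq_some_iff] at h
      obtain ⟨j', hj', rfl⟩ := h
      have := findCB_lt (b :: t) j' hj'
      simp only [List.length_cons] at *
      omega

theorem splitBB_eq_none {l : List Char} (h : findBB l = none) : splitBB l = [l] := by
  rw [splitBB]
  split
  · rfl
  · rename_i e he; rw [h] at he; exact absurd he (by simp)

theorem splitBB_eq_some {l : List Char} {e : Nat} (h : findBB l = some e) :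
    splitBB l = l.take e :: splitBB (l.drop (e + 2)) := by
  rw [splitBB]
  split
  · rename_i he; rw [h] at he; exact absurd he (by simp)
  · rename_i e' he; rw [h] at he; simp only [Option.some.injEq] at he; subst he; rfl

theorem splitBB_ne_nil (l : List Char) : splitBB l ≠ [] := by
  cases h : findBB l with
  | none => rw [splitBB_eq_none h]; simp
  | some e => rw [splitBB_eq_some h]; simp

-- When the whole list has no "}}", A returns it literally unless it contains "{{" (then it raises).
theorem loopA_noBB : ∀ (l : List Char), findBB l = none →
    loopA l = (match findCB l with | none => some l | some _ => none) := by
  intro l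
  induction l with
  | nil => intro _; simp [loopA, findCB]
  | cons c t ih =>
    intro h
    have ht : findBB t = none := findBB_cons_none h
    rw [loopA]
    by_cases hc : c = '{' ∧ t.head? = some '{'
    · rw [if_pos hc]
      obtain ⟨rfl, hh⟩ := hc
      cases t with
      | nil => simp at hh
      | cons b t' =>
        simp only [List.head?_cons, Option.some.injEq] at hh
        subst hh
        have hcb : findCB ('{' :: '{' :: t') = some 0 := by simp [findCB]
        rw [hcb]
        split
        · rfl
        · rename_i e he; rw [h] at he; exact absurd he (by simp)
    · rw [if_neg hc, ih ht, findCB_cons c t hc]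
      cases hcb : findCB t <;> simp

-- Decomposition at the first "}}": A's scan over l = s ++ "}}" ++ rest emits the literal prefix
-- (or the prefix before "{{" plus '*') and continues on rest.
theorem loopA_split : ∀ (l : List Char) (e : Nat), findBB l = some e →
    loopA l = (match findCB (l.take e) with
      | none => (loopA (l.drop (e + 2))).map (fun o => l.take e ++ '}' :: '}' :: o)
      | some j => (loopA (l.drop (e + 2))).map (fun o => l.take j ++ '*' :: o)) := by
  intro l
  induction l with
  | nil => intro e h; simp [findBB] at h
  | cons a t ih =>
    intro e h
    cases t with
    | nil => simp [findBB] at h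
    | cons b t' =>
      simp only [findBB] at h
      split at h
      · -- first "}}" at position 0: a = '}' , b = '}'
        rename_i hp
        obtain ⟨rfl, rfl⟩ := hp
        simp only [Option.some.injEq] at h
        subst h
        have h1 : ¬('}' = '{' ∧ ('}' :: t').head? = some '{') := by simp
        have h2 : ¬('}' = '{' ∧ t'.head? = some '{') := by simp
        rw [show (('}' : Char) :: '}' :: t').take 0 = [] from rfl]
        simp only [findCB]
        rw [loopA, if_neg h1, loopA, if_neg h2]
        cases hx : loopA t' <;> simp [hx]
      · -- no "}}" at position 0: findBB (b :: t') = some e' , e = e' + 1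
        rename_i hp
        simp only [Option.map_eq_some_iff] at h
        obtain ⟨e', he', rfl⟩ := h
        by_cases hcc : a = '{' ∧ b = '{'
        · -- "{{" at position 0: the scanner jumps to e + 2
          obtain ⟨rfl, rfl⟩ := hcc
          have hwhole : findBB ('{' :: '{' :: t') = some (e' + 1) := by
            simp only [findBB, if_neg hp, he', Option.map_some]
          rw [loopA, if_pos (by simp)]
          have htake : findCB (('{' :: '{' :: t').take (e' + 1)) = some 0 := by
            cases e' with
            | zero =>
              cases t' with
              | nil => simp [findBB] at he'
              | cons u t'' =>
                simp only [findBB] at he'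
                split at he'
                · rename_i hq; exact absurd hq.1 (by decide)
                · exact absurd he' (by simp)
            | succ m => simp [List.take, findCB]
          rw [htake]
          split
          · rename_i heq; rw [hwhole] at heq; exact absurd heq (by simp)
          · rename_i e2 heq
            rw [hwhole] at heq
            simp only [Option.some.injEq] at heq
            subst heq
            rfl
        · -- literal first char: peel it off and use the IH on the tail
          rw [loopA, if_neg (by simpa using hcc), ih e' he']
          have hhead : ¬(a = '{' ∧ ((b :: t').take e').head? = some '{') := by
            cases e' with
            | zero => simp
            | succ m => simpa using hcc
          have hfc : findCB ((a :: b :: t').take (e' + 1)) =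
              (findCB ((b :: t').take e')).map (· + 1) := by
            rw [show (a :: b :: t').take (e' + 1) = a :: (b :: t').take e' from rfl]
            exact findCB_cons _ _ hhead
          rw [hfc]
          cases hj : findCB ((b :: t').take e') with
          | none =>
            simp only [Option.map_none]
            cases hx : loopA ((b :: t').drop (e' + 2)) <;> simp_all
          | some j =>
            simp only [Option.map_some]
            cases hx : loopA ((b :: t').drop (e' + 2)) <;> simp_all

theorem main_eq_aux : ∀ (n : Nat) (l : List Char), l.length ≤ n → loopA l = procSegs (splitBB l) := by
  intro n
  induction n with
  | zero =>
    intro l hl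
    have : l = [] := List.eq_nil_of_length_eq_zero (Nat.le_zero.mp hl)
    subst this
    rw [splitBB_eq_none (rfl : findBB [] = none)]
    simp [loopA, procSegs, findCB]
  | succ n ihn =>
    intro l hl
    cases h : findBB l with
    | none =>
      rw [splitBB_eq_none h, loopA_noBB l h]
      cases hc : findCB l <;> simp [procSegs, hc]
    | some e =>
      have hlt : e + 1 < l.length := findBB_lt l e h
      have hrec : loopA (l.drop (e + 2)) = procSegs (splitBB (l.drop (e + 2))) := by
        apply ihn
        simp only [List.length_drop]
        omega
      rw [loopA_split l e h, splitBB_eq_some h]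
      cases hsp : splitBB (l.drop (e + 2)) with
      | nil => exact absurd hsp (splitBB_ne_nil _)
      | cons r rs =>
        rw [hsp] at hrec
        cases hc : findCB (l.take e) with
        | none => simp only [procSegs, hc, hrec]
        | some j =>
          have hj : j < e := by
            have h2 := findCB_lt _ _ hc
            simp only [List.length_take] at h2
            omega
          have htt : (l.take e).take j = l.take j := by
            rw [List.take_take]
            congr 1
            omega
          simp only [procSegs, hc, hrec, htt]

theorem main_eq (l : List Char) : loopA l = procSegs (splitBB l) :=
  main_eq_aux l.length l (Nat.le_refl _)

-- ===== VERDICT (by name: the statement is the Claim_ definition above) =====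
theorem template_to_glob_py_spec : Claim_equal_template_to_glob_py := by
  intro template _ _
  unfold Spec_template_to_glob_py template_to_glob_py template_to_glob_py_alt
  rw [main_eq]
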